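-- pv_equiv track=rewrite | github.com/msornay/fish | fish.py | pick_height_grandeur
-- ===== SOURCE A (Python) =====
-- HEIGHT_GRANDEURS = ["HmnJ", "HINnJ", "HIXnJ"]
--
-- def pick_height_grandeur(obs: list[dict]) -> str | None:
--     """Pick the best available height grandeur from observations."""
--     available = {o["grandeur_hydro_elab"] for o in obs}
--     for g in HEIGHT_GRANDEURS:
--         if g in available:
--             return g
--     # Fallback: any code starting with H
--     for g in sorted(available):
--         if g.startswith("H"):
--             return g
--     return None
-- ===== SOURCE B (Python) =====
-- HEIGHT_GRANDEURS = ["HmnJ", "HINnJ", "HIXnJ"]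
--
-- def _key(code):
--     """Priority key: 0/1/2 for the listed codes, (3, code) for other H-codes, None if ineligible."""
--     if code == "HmnJ":
--         return (0, code)
--     if code == "HINnJ":
--         return (1, code)
--     if code == "HIXnJ":
--         return (2, code)
--     if code.startswith("H"):
--         return (3, code)
--     return None
--
-- def pick_height_grandeur(obs: list[dict]) -> str | None:
--     """Pick the best available height grandeur from observations."""
--     best = None
--     for o in obs:
--         k = _key(o["grandeur_hydro_elab"])
--         if k is not None and (best is None or k < best):
--             best = k
--     return best[1] if best is not None else None
-- ===== Notes on version B (the rewrite author's own statement) =====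
-- stated objective: alternative
-- what changed: Replaces A's staged control flow (build a set, probe the three fixed codes in order, then scan the sorted set for an H-code) by a single pass over the observations keeping the minimum code under a priority key (0/1/2 for the listed codes, (3, code) for other H-codes).
import Mathlib
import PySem

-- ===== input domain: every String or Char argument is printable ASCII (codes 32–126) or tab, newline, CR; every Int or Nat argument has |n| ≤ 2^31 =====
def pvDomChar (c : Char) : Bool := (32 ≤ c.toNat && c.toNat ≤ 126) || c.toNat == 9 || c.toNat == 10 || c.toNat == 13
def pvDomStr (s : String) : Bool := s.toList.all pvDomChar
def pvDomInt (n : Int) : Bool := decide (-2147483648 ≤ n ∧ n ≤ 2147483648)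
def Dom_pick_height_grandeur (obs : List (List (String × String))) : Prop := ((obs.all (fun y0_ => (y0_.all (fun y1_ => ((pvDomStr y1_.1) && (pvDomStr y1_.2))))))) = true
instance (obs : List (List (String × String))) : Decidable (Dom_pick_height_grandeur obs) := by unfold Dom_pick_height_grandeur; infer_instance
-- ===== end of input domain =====

-- B replaces A's staged control flow (three fixed candidates, then a scan of the sorted set)
-- by a single pass keeping the minimum code under a priority key; objective: alternative/simpler.

-- ===== PORT A =====
def HEIGHT_GRANDEURS : List String := ["HmnJ", "HINnJ", "HIXnJ"]

-- o["grandeur_hydro_elab"]; total form via getD — Pre_ excludes the KeyError inputs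
def obsCode (o : List (String × String)) : String :=
  (PySem.Dict.mk o).getD "grandeur_hydro_elab" ""

def pick_height_grandeur (obs : List (List (String × String))) : Option String :=
  let available : PySem.Set String := PySem.Set.ofList (obs.map (fun o => obsCode o))
  match HEIGHT_GRANDEURS.find? (fun g => PySem.Set.contains available g) with
  | some g => some g
  | none =>
      (PySem.List.sorted available (fun x => x)).find?
        (fun g => PySem.Str.startswith g "H")

-- ===== PORT B =====
-- _key(code): priority key, none = ineligible
def keyB (c : String) : Option (Int × String) :=
  if c = "HmnJ" then some (0, c)
  else if c = "HINnJ" then some (1, c)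
  else if c = "HIXnJ" then some (2, c)
  else if PySem.Str.startswith c "H" then some (3, c)
  else none

-- Python tuple comparison k < best (int, str lexicographic)
def ltKey (a b : Int × String) : Bool :=
  a.1 < b.1 || (a.1 == b.1 && a.2 < b.2)

def stepB (best : Option (Int × String)) (o : List (String × String)) : Option (Int × String) :=
  match keyB (obsCode o) with
  | none => best
  | some k =>
      match best with
      | none => some k
      | some b => if ltKey k b then some k else some b

def pick_height_grandeur_alt (obs : List (List (String × String))) : Option String :=
  (obs.foldl stepB none).map Prod.snd

-- ===== PRECONDITION & SPEC =====
-- Pre_ excludes exactly the observations missing the "grandeur_hydro_elab" key, on which A raises KeyError.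
def Pre_pick_height_grandeur (obs : List (List (String × String))) : Prop :=
  ∀ o ∈ obs, (PySem.Dict.mk o).contains "grandeur_hydro_elab" = true
instance (obs : List (List (String × String))) : Decidable (Pre_pick_height_grandeur obs) := by
  unfold Pre_pick_height_grandeur; infer_instance

def pvWitness_pick_height_grandeur : (List (List (String × String))) :=
  [[("grandeur_hydro_elab", "HmnJ")], [("grandeur_hydro_elab", "Habc")]]

def Spec_pick_height_grandeur (obs : List (List (String × String))) (out : Option String) : Prop := out = pick_height_grandeur_alt obs
instance (obs : List (List (String × String))) (out : Option String) : Decidable (Spec_pick_height_grandeur obs out) := by unfold Spec_pick_height_grandeur; infer_instance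

-- ===== CLAIM (what is proved, stated in full; the proofs are below) =====
def Claim_equal_pick_height_grandeur : Prop := ∀ (obs : List (List (String × String))), Dom_pick_height_grandeur obs → Pre_pick_height_grandeur obs → Spec_pick_height_grandeur obs (pick_height_grandeur obs)

-- ===== LEMMAS AND PROOFS =====

-- step of B's loop expressed on the code value
def step2 (best : Option (Int × String)) (c : String) : Option (Int × String) :=
  match keyB c with
  | none => best
  | some k =>
      match best with
      | none => some k
      | some b => if ltKey k b then some k else some b

-- A's body as a function of the code list
def pickA (L : List String) : Option String :=
  match HEIGHT_GRANDEURS.find? (fun g => PySem.Set.contains (PySem.Set.ofList L) g) with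
  | some g => some g
  | none =>
      (PySem.List.sorted (PySem.Set.ofList L) (fun x => x)).find?
        (fun g => PySem.Str.startswith g "H")

theorem pickA_eq (obs : List (List (String × String))) :
    pick_height_grandeur obs = pickA (obs.map (fun o => obsCode o)) := rfl

theorem altB_eq (obs : List (List (String × String))) :
    pick_height_grandeur_alt obs = ((obs.map (fun o => obsCode o)).foldl step2 none).map Prod.snd := by
  unfold pick_height_grandeur_alt
  rw [List.foldl_map]
  rfl

-- ltKey is a strict linear order
theorem ltKey_iff (a b : Int × String) :
    ltKey a b = true ↔ a.1 < b.1 ∨ (a.1 = b.1 ∧ a.2 < b.2) := by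
  simp [ltKey]

theorem ltKey_irrefl (a : Int × String) : ltKey a a = false := by
  simp [ltKey]

theorem ltKey_trans {a b c : Int × String} (h1 : ltKey a b = true) (h2 : ltKey b c = true) :
    ltKey a c = true := by
  rw [ltKey_iff] at *
  rcases h1 with h1 | ⟨e1, l1⟩ <;> rcases h2 with h2 | ⟨e2, l2⟩
  · exact Or.inl (lt_trans h1 h2)
  · exact Or.inl (e2 ▸ h1)
  · exact Or.inl (e1 ▸ h2)
  · exact Or.inr ⟨e1.trans e2, lt_trans l1 l2⟩

theorem ltKey_neg_trans {a b c : Int × String} (h1 : ltKey a b = false) (h2 : ltKey b c = false) :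
    ltKey a c = false := by
  by_contra h
  have hac : ltKey a c = true := by
    cases hx : ltKey a c
    · exact absurd hx h
    · rfl
  rw [ltKey_iff] at hac
  have h1' := (Bool.not_eq_true _).mpr h1
  have h2' := (Bool.not_eq_true _).mpr h2
  rw [ltKey_iff] at h1' h2'
  push Not at h1' h2'
  have hba : b.1 ≤ a.1 := h1'.1
  have hcb : c.1 ≤ b.1 := h2'.1
  rcases hac with hl | ⟨he, hs⟩
  · omega
  · have e1 : b.1 = a.1 := by omega
    have e2 : c.1 = b.1 := by omega
    have hba2 : b.2 ≤ a.2 := h1'.2 e1.symm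
    have hcb2 : c.2 ≤ b.2 := h2'.2 e2.symm
    exact absurd hs (not_lt_of_ge (le_trans hcb2 hba2))

-- structure of keyB's results
theorem keyB_cases {c : String} {k : Int × String} (h : keyB c = some k) :
    (c = "HmnJ" ∧ k = (0, "HmnJ")) ∨ (c = "HINnJ" ∧ k = (1, "HINnJ")) ∨
    (c = "HIXnJ" ∧ k = (2, "HIXnJ")) ∨
    (k = (3, c) ∧ PySem.Str.startswith c "H" = true ∧
      c ≠ "HmnJ" ∧ c ≠ "HINnJ" ∧ c ≠ "HIXnJ") := by
  unfold keyB at h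
  split_ifs at h with h0 h1 h2 h3 <;> simp_all

theorem keyB_none_startswith {c : String} (h : keyB c = none) :
    PySem.Str.startswith c "H" = false := by
  unfold keyB at h
  split_ifs at h <;> simp_all

theorem startswith_keyB {c : String} (h : PySem.Str.startswith c "H" = true) :
    ∃ k, keyB c = some k := by
  unfold keyB
  split_ifs <;> simp_all

-- fold characterization: none case
theorem fold_none_iff (L : List String) (acc : Option (Int × String)) :
    L.foldl step2 acc = none ↔ acc = none ∧ ∀ c ∈ L, keyB c = none := by
  induction L generalizing acc with
  | nil => simp
  | cons c L ih =>
    simp only [List.foldl_cons, ih, List.mem_cons]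
    constructor
    · rintro ⟨hstep, hall⟩
      unfold step2 at hstep
      cases hk : keyB c with
      | none =>
        rw [hk] at hstep
        exact ⟨hstep, fun d hd => hd.elim (fun e => e ▸ hk) (hall d)⟩
      | some k =>
        rw [hk] at hstep
        exfalso
        cases acc with
        | none => cases hstep
        | some b =>
          dsimp only at hstep
          split_ifs at hstep
    · rintro ⟨hacc, hall⟩
      have hk : keyB c = none := hall c (Or.inl rfl)
      refine ⟨?_, fun d hd => hall d (Or.inr hd)⟩
      unfold step2; rw [hk]; exact hacc

-- fold characterization: membership
theorem fold_mem (L : List String) (acc : Option (Int × String)) (k : Int × String)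
    (h : L.foldl step2 acc = some k) :
    acc = some k ∨ ∃ c ∈ L, keyB c = some k := by
  induction L generalizing acc with
  | nil => exact Or.inl h
  | cons c L ih =>
    simp only [List.foldl_cons] at h
    rcases ih _ h with hacc | ⟨d, hd, hkd⟩
    · unfold step2 at hacc
      cases hk : keyB c with
      | none => rw [hk] at hacc; exact Or.inl hacc
      | some kc =>
        rw [hk] at hacc
        cases acc with
        | none =>
          simp only [Option.some.injEq] at hacc
          exact Or.inr ⟨c, List.mem_cons_self, hacc ▸ hk⟩
        | some b =>
          by_cases hlt : ltKey kc b = true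
          · simp only [hlt, if_true, Option.some.injEq] at hacc
            exact Or.inr ⟨c, List.mem_cons_self, hacc ▸ hk⟩
          · simp only [Bool.not_eq_true] at hlt
            simp only [hlt, Bool.false_eq_true, if_false] at hacc
            exact Or.inl hacc
    · exact Or.inr ⟨d, List.mem_cons_of_mem _ hd, hkd⟩

-- fold characterization: minimality
theorem fold_min (L : List String) (acc : Option (Int × String)) (k : Int × String)
    (h : L.foldl step2 acc = some k) :
    (∀ b, acc = some b → ltKey b k = false) ∧
    (∀ c ∈ L, ∀ kc, keyB c = some kc → ltKey kc k = false) := by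
  induction L generalizing acc with
  | nil =>
    simp only [List.foldl_nil] at h
    exact ⟨fun b hb => by rw [hb] at h; cases h; exact ltKey_irrefl k, by simp⟩
  | cons c L ih =>
    simp only [List.foldl_cons] at h
    obtain ⟨hacc', hrest⟩ := ih _ h
    -- analyze the head step
    cases hk : keyB c with
    | none =>
      have hstep : step2 acc c = acc := by unfold step2; rw [hk]
      rw [hstep] at hacc'
      refine ⟨hacc', fun d hd kd hkd => ?_⟩
      rcases List.mem_cons.mp hd with rfl | hd'
      · rw [hk] at hkd; cases hkd
      · exact hrest d hd' kd hkd
    | some kc =>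
      cases acc with
      | none =>
        have hstep : step2 none c = some kc := by unfold step2; rw [hk]
        rw [hstep] at hacc'
        have hkc : ltKey kc k = false := hacc' kc rfl
        refine ⟨by simp, fun d hd kd hkd => ?_⟩
        rcases List.mem_cons.mp hd with rfl | hd'
        · rw [hk] at hkd; cases hkd; exact hkc
        · exact hrest d hd' kd hkd
      | some b =>
        by_cases hlt : ltKey kc b = true
        · have hstep : step2 (some b) c = some kc := by unfold step2; rw [hk]; simp [hlt]
          rw [hstep] at hacc'
          have hkc : ltKey kc k = false := hacc' kc rfl
          have hb : ltKey b k = false := by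
            by_contra hb'
            have hb2 : ltKey b k = true := by
              cases hx : ltKey b k
              · exact absurd hx hb'
              · rfl
            exact absurd (ltKey_trans hlt hb2) (by rw [hkc]; simp)
          refine ⟨fun b' hb' => by cases hb'; exact hb, fun d hd kd hkd => ?_⟩
          rcases List.mem_cons.mp hd with rfl | hd'
          · rw [hk] at hkd; cases hkd; exact hkc
          · exact hrest d hd' kd hkd
        · have hltf : ltKey kc b = false := by
            cases hx : ltKey kc b
            · rfl
            · exact absurd hx hlt
          have hstep : step2 (some b) c = some b := by unfold step2; rw [hk]; simp [hltf]
          rw [hstep] at hacc'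
          have hb : ltKey b k = false := hacc' b rfl
          refine ⟨fun b' hb' => by cases hb'; exact hb, fun d hd kd hkd => ?_⟩
          rcases List.mem_cons.mp hd with rfl | hd'
          · rw [hk] at hkd; cases hkd; exact ltKey_neg_trans hltf hb
          · exact hrest d hd' kd hkd

-- first element of an ascending list satisfying p is ≤ every satisfying element
theorem find?_pairwise_min {l : List String} {p : String → Bool} {g : String}
    (hp : l.Pairwise (· ≤ ·)) (h : l.find? p = some g) :
    ∀ c ∈ l, p c = true → g ≤ c := by
  induction l with
  | nil => cases h
  | cons x t ih =>
    rcases List.pairwise_cons.mp hp with ⟨hx, ht⟩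
    by_cases hpx : p x = true
    · rw [List.find?_cons_of_pos hpx] at h
      cases h
      intro c hc _
      rcases List.mem_cons.mp hc with rfl | hc'
      · exact le_refl _
      · exact hx c hc'
    · have hpx' : p x = false := by
        cases hv : p x
        · rfl
        · exact absurd hv hpx
      rw [List.find?_cons_of_neg (by simp [hpx']) ] at h
      intro c hc hpc
      rcases List.mem_cons.mp hc with rfl | hc'
      · rw [hpc] at hpx'; cases hpx'
      · exact ih ht h c hc' hpc

-- contains on the built set = list membership
theorem contains_ofList (L : List String) (g : String) :
    PySem.Set.contains (PySem.Set.ofList L) g = true ↔ g ∈ L := by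
  simp [PySem.Set.contains, PySem.Set.mem_ofList]

theorem contains_ofList_false (L : List String) (g : String) (h : g ∉ L) :
    PySem.Set.contains (PySem.Set.ofList L) g = false := by
  cases hx : PySem.Set.contains (PySem.Set.ofList L) g
  · rfl
  · exact absurd ((contains_ofList L g).mp hx) h

-- main bridge: A's staged selection = B's keyed minimum, as functions of the code list
theorem pickA_eq_fold (L : List String) :
    pickA L = (L.foldl step2 none).map Prod.snd := by
  cases hf : L.foldl step2 none with
  | none =>
    obtain ⟨-, hall⟩ := (fold_none_iff L none).mp hf
    have hnot : ∀ g ∈ HEIGHT_GRANDEURS, g ∉ L := by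
      intro g hg hgl
      have hk := hall g hgl
      simp only [HEIGHT_GRANDEURS, List.mem_cons, List.not_mem_nil, or_false] at hg
      rcases hg with rfl | rfl | rfl <;> simp [keyB] at hk
    unfold pickA
    have h1 : HEIGHT_GRANDEURS.find? (fun g => PySem.Set.contains (PySem.Set.ofList L) g) = none := by
      rw [List.find?_eq_none]
      intro g hg
      have hcf := contains_ofList_false L g (hnot g hg)
      simp only [hcf, Bool.false_eq_true, not_false_eq_true]
    rw [h1]
    show (PySem.List.sorted (PySem.Set.ofList L) (fun x => x)).find?
        (fun g => PySem.Str.startswith g "H") = none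
    rw [List.find?_eq_none]
    intro g hg
    have hgL : g ∈ L := (PySem.Set.mem_ofList L g).mp ((PySem.List.mem_sorted _ _ _ _).mp hg)
    have hsf := keyB_none_startswith (hall g hgL)
    simp only [hsf, Bool.false_eq_true, not_false_eq_true]
  | some k =>
    obtain hmem := fold_mem L none k hf
    obtain ⟨-, hmin⟩ := fold_min L none k hf
    rcases hmem with h0 | ⟨c, hcL, hkc⟩
    · cases h0
    simp only [Option.map_some]
    rcases keyB_cases hkc with ⟨rfl, rfl⟩ | ⟨rfl, rfl⟩ | ⟨rfl, rfl⟩ | ⟨rfl, hsw, hne0, hne1, hne2⟩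
    · -- k = (0, "HmnJ")
      have hc : PySem.Set.contains (PySem.Set.ofList L) "HmnJ" = true :=
        (contains_ofList L _).mpr hcL
      have hfind : HEIGHT_GRANDEURS.find? (fun g => PySem.Set.contains (PySem.Set.ofList L) g) = some "HmnJ" :=
        List.find?_cons_of_pos hc
      unfold pickA
      rw [hfind]
    · -- k = (1, "HINnJ"); "HmnJ" cannot be in L
      have h0 : "HmnJ" ∉ L := by
        intro hmem0
        have := hmin "HmnJ" hmem0 (0, "HmnJ") (by decide)
        simp [ltKey] at this
      have hc : PySem.Set.contains (PySem.Set.ofList L) "HINnJ" = true :=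
        (contains_ofList L _).mpr hcL
      have hfind : HEIGHT_GRANDEURS.find? (fun g => PySem.Set.contains (PySem.Set.ofList L) g) = some "HINnJ" := by
        rw [show HEIGHT_GRANDEURS = "HmnJ" :: ["HINnJ", "HIXnJ"] from rfl,
          List.find?_cons_of_neg (by have h := contains_ofList_false L "HmnJ" h0; simp only [h, Bool.false_eq_true, not_false_eq_true])]
        exact List.find?_cons_of_pos hc
      unfold pickA
      rw [hfind]
    · -- k = (2, "HIXnJ")
      have h0 : "HmnJ" ∉ L := by
        intro hmem0
        have := hmin "HmnJ" hmem0 (0, "HmnJ") (by decide)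
        simp [ltKey] at this
      have h1 : "HINnJ" ∉ L := by
        intro hmem1
        have := hmin "HINnJ" hmem1 (1, "HINnJ") (by decide)
        simp [ltKey] at this
      have hc : PySem.Set.contains (PySem.Set.ofList L) "HIXnJ" = true :=
        (contains_ofList L _).mpr hcL
      have hfind : HEIGHT_GRANDEURS.find? (fun g => PySem.Set.contains (PySem.Set.ofList L) g) = some "HIXnJ" := by
        rw [show HEIGHT_GRANDEURS = "HmnJ" :: "HINnJ" :: ["HIXnJ"] from rfl,
          List.find?_cons_of_neg (by have h := contains_ofList_false L "HmnJ" h0; simp only [h, Bool.false_eq_true, not_false_eq_true]),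
          List.find?_cons_of_neg (by have h := contains_ofList_false L "HINnJ" h1; simp only [h, Bool.false_eq_true, not_false_eq_true])]
        exact List.find?_cons_of_pos hc
      unfold pickA
      rw [hfind]
    · -- k = (3, c): fallback scan of the sorted set
      have h0 : "HmnJ" ∉ L := by
        intro hmem0
        have := hmin "HmnJ" hmem0 (0, "HmnJ") (by decide)
        simp [ltKey] at this
      have h1 : "HINnJ" ∉ L := by
        intro hmem1
        have := hmin "HINnJ" hmem1 (1, "HINnJ") (by decide)
        simp [ltKey] at this
      have h2 : "HIXnJ" ∉ L := by
        intro hmem2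
        have := hmin "HIXnJ" hmem2 (2, "HIXnJ") (by decide)
        simp [ltKey] at this
      have hfind0 : HEIGHT_GRANDEURS.find? (fun g => PySem.Set.contains (PySem.Set.ofList L) g) = none := by
        rw [List.find?_eq_none]
        intro g hg
        simp only [HEIGHT_GRANDEURS, List.mem_cons, List.not_mem_nil, or_false] at hg
        rcases hg with rfl | rfl | rfl
        · simp only [contains_ofList_false L _ h0, Bool.false_eq_true, not_false_eq_true]
        · simp only [contains_ofList_false L _ h1, Bool.false_eq_true, not_false_eq_true]
        · simp only [contains_ofList_false L _ h2, Bool.false_eq_true, not_false_eq_true]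
      unfold pickA
      rw [hfind0]
      show (PySem.List.sorted (PySem.Set.ofList L) (fun x => x)).find?
          (fun g => PySem.Str.startswith g "H") = some c
      -- c is in the sorted list and satisfies the predicate
      have hcs : c ∈ PySem.List.sorted (PySem.Set.ofList L) (fun x => x) := by
        rw [PySem.List.mem_sorted]
        exact (PySem.Set.mem_ofList L c).mpr hcL
      have hpair : (PySem.List.sorted (PySem.Set.ofList L) (fun x => x)).Pairwise (· ≤ ·) :=
        PySem.List.sorted_pairwise _ _
      cases hfind : (PySem.List.sorted (PySem.Set.ofList L) (fun x => x)).find?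
          (fun g => PySem.Str.startswith g "H") with
      | none =>
        rw [List.find?_eq_none] at hfind
        exact absurd hsw (by simpa using hfind c hcs)
      | some g =>
        -- g ≤ c by sortedness / first-match, and ¬ g < c by B's minimality ⇒ g = c
        have hgle : g ≤ c := find?_pairwise_min hpair hfind c hcs hsw
        have hgmem : g ∈ L := by
          have := List.mem_of_find?_eq_some hfind
          rw [PySem.List.mem_sorted] at this
          exact (PySem.Set.mem_ofList L g).mp this
        have hgsw : PySem.Str.startswith g "H" = true := by
          simpa using List.find?_some hfind
        obtain ⟨kg, hkg⟩ := startswith_keyB hgsw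
        have hming := hmin g hgmem kg hkg
        rcases keyB_cases hkg with ⟨rfl, -⟩ | ⟨rfl, -⟩ | ⟨rfl, -⟩ | ⟨rfl, -, -, -, -⟩
        · exact absurd hgmem h0
        · exact absurd hgmem h1
        · exact absurd hgmem h2
        · -- kg = (3, g); ltKey (3,g) (3,c) = false ⇒ ¬ g < c
          have hnlt : ¬ g < c := by
            intro hlt
            have : ltKey (3, g) (3, c) = true := by
              rw [ltKey_iff]; exact Or.inr ⟨rfl, hlt⟩
            rw [hming] at this; cases this
          have hgc : g = c := le_antisymm hgle (le_of_not_gt hnlt)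
          rw [hgc]

-- ===== VERDICT (by name: the statement is the Claim_ definition above) =====
theorem pick_height_grandeur_spec : Claim_equal_pick_height_grandeur := by
  intro obs _ _
  unfold Spec_pick_height_grandeur
  rw [pickA_eq, altB_eq, pickA_eq_fold]
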